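-- pv_equiv track=rewrite | github.com/pennyenterline/Infographic | infographic.py | total_count_words
-- ===== SOURCE A (Python) =====
-- def total_count_words(dictionary):
--     '''
--     counts the number of small, medium, and big words
--     small: 0-4 letters
--     medium: 5-7 letters
--     big: 8-any letters
--     returns the number of these words
--     '''
--     small_number, medium_number, big_number = 0, 0, 0
--     for key in dictionary:
--         if 0 <= len(key) <= 4:
--             small_number += 1
--         elif 5 <= len(key) <= 7:
--             medium_number += 1
--         elif 8 <= len(key):
--             big_number += 1
--     return small_number, medium_number, big_number
-- ===== SOURCE B (Python) =====
-- def total_count_words(dictionary):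
--     small = sum(1 for key in dictionary if len(key) <= 4)
--     medium = sum(1 for key in dictionary if 5 <= len(key) <= 7)
--     big = sum(1 for key in dictionary if len(key) >= 8)
--     return small, medium, big
-- ===== Notes on version B (the rewrite author's own statement) =====
-- stated objective: idiomatic
-- what changed: Replaces the single loop with a three-slot accumulator by three independent comprehension passes, one per length band.
import Mathlib
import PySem

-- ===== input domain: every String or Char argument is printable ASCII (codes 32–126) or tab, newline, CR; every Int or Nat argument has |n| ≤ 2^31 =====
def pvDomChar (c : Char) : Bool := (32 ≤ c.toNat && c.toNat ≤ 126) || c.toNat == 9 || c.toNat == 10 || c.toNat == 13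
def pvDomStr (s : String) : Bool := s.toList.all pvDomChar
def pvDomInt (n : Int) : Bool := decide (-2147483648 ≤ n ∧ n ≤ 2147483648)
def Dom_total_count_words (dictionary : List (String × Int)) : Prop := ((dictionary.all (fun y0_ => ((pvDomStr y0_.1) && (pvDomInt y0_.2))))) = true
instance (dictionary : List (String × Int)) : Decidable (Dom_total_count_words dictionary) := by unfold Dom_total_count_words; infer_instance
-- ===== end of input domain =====

-- B replaces A's single accumulating loop with three independent per-band counting passes.

-- ===== PORT A =====
-- one pass, triple accumulator, branch order as in A
def total_count_words (dictionary : List (String × Int)) : Int × Int × Int :=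
  dictionary.foldl
    (fun acc kv =>
      let n := PySem.Str.len kv.1
      if 0 ≤ n ∧ n ≤ 4 then (acc.1 + 1, acc.2.1, acc.2.2)
      else if 5 ≤ n ∧ n ≤ 7 then (acc.1, acc.2.1 + 1, acc.2.2)
      else if 8 ≤ n then (acc.1, acc.2.1, acc.2.2 + 1)
      else acc)
    (0, 0, 0)

-- ===== PORT B =====
-- sum(1 for key in dictionary if cond) ported as a fold adding 1 under the condition
def pvCountIf (dictionary : List (String × Int)) (p : Int → Bool) : Int :=
  dictionary.foldl (fun s kv => if p (PySem.Str.len kv.1) then s + 1 else s) 0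

def total_count_words_alt (dictionary : List (String × Int)) : Int × Int × Int :=
  (pvCountIf dictionary (fun n => n ≤ 4),
   pvCountIf dictionary (fun n => 5 ≤ n && n ≤ 7),
   pvCountIf dictionary (fun n => 8 ≤ n))

-- ===== PRECONDITION & SPEC =====
def Spec_total_count_words (dictionary : List (String × Int)) (out : Int × Int × Int) : Prop := out = total_count_words_alt dictionary
instance (dictionary : List (String × Int)) (out : Int × Int × Int) : Decidable (Spec_total_count_words dictionary out) := by unfold Spec_total_count_words; infer_instance

-- ===== CLAIM (what is proved, stated in full; the proofs are below) =====
def Claim_equal_total_count_words : Prop := ∀ (dictionary : List (String × Int)), Dom_total_count_words dictionary → Spec_total_count_words dictionary (total_count_words dictionary)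

-- ===== LEMMAS AND PROOFS =====
lemma foldl_count_shift {α : Type} (p : α → Bool) (l : List α) (t : Int) :
    l.foldl (fun s x => if p x = true then s + 1 else s) t
  = t + l.foldl (fun s x => if p x = true then s + 1 else s) 0 := by
  induction l generalizing t with
  | nil => simp
  | cons x l ih =>
    simp only [List.foldl_cons]
    by_cases h : p x = true
    · simp only [h, if_true]
      rw [ih (t + 1), ih (0 + 1)]; ring
    · simp only [h, if_false]
      exact ih t

lemma tcw_gen (dictionary : List (String × Int)) (a b c : Int) :
    dictionary.foldl
      (fun acc kv =>
        let n := PySem.Str.len kv.1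
        if 0 ≤ n ∧ n ≤ 4 then (acc.1 + 1, acc.2.1, acc.2.2)
        else if 5 ≤ n ∧ n ≤ 7 then (acc.1, acc.2.1 + 1, acc.2.2)
        else if 8 ≤ n then (acc.1, acc.2.1, acc.2.2 + 1)
        else acc)
      (a, b, c)
    = (a + pvCountIf dictionary (fun n => n ≤ 4),
       b + pvCountIf dictionary (fun n => 5 ≤ n && n ≤ 7),
       c + pvCountIf dictionary (fun n => 8 ≤ n)) := by
  induction dictionary generalizing a b c with
  | nil => simp [pvCountIf]
  | cons kv tl ih =>
    have hlen : (0:Int) ≤ PySem.Str.len kv.1 := by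
      simp [PySem.Str.len]
    simp only [List.foldl_cons, pvCountIf, List.foldl_cons] at *
    set n := PySem.Str.len kv.1 with hn
    by_cases h1 : n ≤ 4
    · have hb2 : (5 ≤ n && n ≤ 7) = false := by simp; omega
      have hb3 : (decide (8 ≤ n)) = false := by simp; omega
      simp only [hlen, h1, and_self, if_true, decide_true, hb2, hb3, if_false, ih, pvCountIf]
      refine Prod.ext (by rw [foldl_count_shift _ _ (0 + 1)]; ring) (Prod.ext rfl rfl)
    · by_cases h2 : n ≤ 7
      · have h5 : 5 ≤ n := by omega
        have hb1 : (decide (n ≤ 4)) = false := by simp; omega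
        have hb3 : (decide (8 ≤ n)) = false := by simp; omega
        have hA : ¬ (0 ≤ n ∧ n ≤ 4) := by omega
        simp only [hA, if_false, h5, h2, and_self, if_true, ih, pvCountIf, hb1, hb3,
          decide_true, Bool.and_self, Bool.false_eq_true]
        refine Prod.ext rfl (Prod.ext (by rw [foldl_count_shift _ _ (0 + 1)]; ring) rfl)
      · have h8 : 8 ≤ n := by omega
        have hb1 : (decide (n ≤ 4)) = false := by simp; omega
        have hb2 : (5 ≤ n && n ≤ 7) = false := by simp; omega
        have hA : ¬ (0 ≤ n ∧ n ≤ 4) := by omega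
        have hB : ¬ (5 ≤ n ∧ n ≤ 7) := by omega
        simp only [hA, hB, if_false, h8, if_true, ih, pvCountIf, hb1, hb2,
          decide_true, Bool.false_eq_true]
        refine Prod.ext rfl (Prod.ext rfl (by rw [foldl_count_shift _ _ (0 + 1)]; ring))

-- ===== VERDICT (by name: the statement is the Claim_ definition above) =====
theorem total_count_words_spec : Claim_equal_total_count_words := by
  intro d _
  unfold Spec_total_count_words total_count_words total_count_words_alt
  rw [tcw_gen]
  simp
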